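-- pv_equiv track=rewrite | github.com/Gabriel1329/Diccionario-Ingles | Diccionario.py | Rsignos
-- ===== SOURCE A (Python) =====
-- def Rsignos(R,r):
--     if R==[]:
--         return r
--     else:
--         if R[0][len(R[0])-2]==" ":
--             r=r+[R[0][:len(R[0])-2]]
--             return Rsignos(R[1:],r)
--         else:
--             r=r+[R[0][:len(R[0])-3]]
--             return Rsignos(R[1:],r)
-- ===== SOURCE B (Python) =====
-- def Rsignos(R, r):
--     trimmed = []
--     for s in R:
--         cut = 2 if s[len(s)-2] == " " else 3
--         trimmed.append(s[:len(s)-cut])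
--     return r + trimmed
-- ===== Notes on version B (the rewrite author's own statement) =====
-- stated objective: faster
-- what changed: B replaces A's recursion that rebuilds the whole accumulator with r+[x] at every step by a single loop appending each trimmed string to a fresh list, concatenated to r once at the end.
import Mathlib
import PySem

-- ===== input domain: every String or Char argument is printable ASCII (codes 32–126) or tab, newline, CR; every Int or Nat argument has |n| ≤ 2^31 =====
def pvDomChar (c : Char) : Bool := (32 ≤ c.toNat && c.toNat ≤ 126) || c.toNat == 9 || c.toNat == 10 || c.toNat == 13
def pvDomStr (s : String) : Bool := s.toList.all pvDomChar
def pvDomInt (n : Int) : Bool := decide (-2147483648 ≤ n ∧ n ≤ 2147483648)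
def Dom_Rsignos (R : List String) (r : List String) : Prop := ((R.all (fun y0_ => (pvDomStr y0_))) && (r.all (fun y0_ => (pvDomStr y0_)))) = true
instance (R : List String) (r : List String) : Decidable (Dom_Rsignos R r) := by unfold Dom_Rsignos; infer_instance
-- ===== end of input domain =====

-- B replaces A's tail recursion with quadratic accumulator re-concatenation by one loop
-- building the trimmed list and a single final concatenation (objective: simpler).


-- ===== PORT A =====
-- literal transliteration of A's recursion; s[len(s)-2] is Str.pyGet? (none = IndexError,
-- excluded by Pre_), s[:len(s)-k] is Str.slice
def Rsignos (R : List String) (r : List String) : List String :=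
  match R with
  | [] => r
  | s :: rest =>
    if PySem.Str.pyGet? s (PySem.Str.len s - 2) = some ' ' then
      Rsignos rest (r ++ [PySem.Str.slice s none (some (PySem.Str.len s - 2))])
    else
      Rsignos rest (r ++ [PySem.Str.slice s none (some (PySem.Str.len s - 3))])

-- ===== PORT B =====
-- loop body of Source B: cut = 2 if s[len(s)-2]==" " else 3; s[:len(s)-cut]
def pvTrimB (s : String) : String :=
  let cut : Int := if PySem.Str.pyGet? s (PySem.Str.len s - 2) = some ' ' then 2 else 3
  PySem.Str.slice s none (some (PySem.Str.len s - cut))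

def Rsignos_alt (R : List String) (r : List String) : List String :=
  r ++ R.foldl (fun trimmed s => trimmed ++ [pvTrimB s]) []

-- ===== PRECONDITION & SPEC =====
-- Pre_ excludes lists containing an empty string, on which Python A (and B) raises IndexError at s[len(s)-2].
def Pre_Rsignos (R : List String) (r : List String) : Prop := "" ∉ R
instance (R : List String) (r : List String) : Decidable (Pre_Rsignos R r) := by unfold Pre_Rsignos; infer_instance
def pvWitness_Rsignos : List String × List String := (["abc ", "de f"], ["q"])
def Spec_Rsignos (R : List String) (r : List String) (out : List String) : Prop := out = Rsignos_alt R r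
instance (R : List String) (r : List String) (out : List String) : Decidable (Spec_Rsignos R r out) := by unfold Spec_Rsignos; infer_instance

-- ===== CLAIM (what is proved, stated in full; the proofs are below) =====
def Claim_equal_Rsignos : Prop := ∀ (R : List String) (r : List String), Dom_Rsignos R r → Pre_Rsignos R r → Spec_Rsignos R r (Rsignos R r)

-- ===== LEMMAS AND PROOFS =====

-- B's loop, run from any accumulator, appends the map of pvTrimB
theorem pvFoldl_trim (xs : List String) (acc : List String) :
    xs.foldl (fun trimmed s => trimmed ++ [pvTrimB s]) acc = acc ++ xs.map pvTrimB := by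
  induction xs generalizing acc with
  | nil => simp
  | cons x xs ih => simp [List.foldl, ih, List.append_assoc]

-- A's step produces exactly pvTrimB of the head
theorem pvRsignos_eq_map (R : List String) : ∀ r, Rsignos R r = r ++ R.map pvTrimB := by
  induction R with
  | nil => intro r; simp [Rsignos]
  | cons s rest ih =>
    intro r
    simp only [Rsignos, ih, pvTrimB]
    split <;> rename_i h <;> simp at h <;> simp [pvTrimB, h, List.append_assoc]

-- ===== VERDICT (by name: the statement is the Claim_ definition above) =====
theorem Rsignos_spec : Claim_equal_Rsignos := by
  intro R r _ _
  unfold Spec_Rsignos Rsignos_alt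
  rw [pvRsignos_eq_map, pvFoldl_trim]
  simp
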